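-- pv_equiv track=rewrite | github.com/pedroafmonteiro/fp-leic | Week 08 (November 6 - November 12)/Practice 07 - Dictionaries & Sets/PY07 Playground - Dictionaries & Sets/[07] Treasure.py | treasure
-- ===== SOURCE A (Python) =====
-- def treasure(clues):
--     current_location = (0, 0)
--     visited_locations = set()
--
--     while current_location in clues:
--         visited_locations.add(current_location)
--         current_location = clues[current_location]
--         if current_location in visited_locations:
--             break
--
--     return current_location
-- ===== SOURCE B (Python) =====
-- def treasure(clues):
--     # Constant-memory variant: instead of keeping a visited set, detect a
--     # revisit by re-walking the chain from the origin and comparing nodes.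
--     current = (0, 0)
--     steps = 0
--     while current in clues:
--         nxt = clues[current]
--         # has nxt already appeared among the first steps+1 nodes of the walk?
--         x = (0, 0)
--         seen = False
--         for _ in range(steps + 1):
--             if x == nxt:
--                 seen = True
--                 break
--             x = clues.get(x, x)  # default never used: x stays on the walked path
--         if seen:
--             return nxt
--         current = nxt
--         steps += 1
--     return current
-- ===== Notes on version B (the rewrite author's own statement) =====
-- stated objective: alternative
-- what changed: Replaces the auxiliary visited-set with constant-memory cycle detection: a revisit of the next node is detected by re-walking the chain from the origin and comparing nodes, so no set is built or maintained.
import Mathlib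
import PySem

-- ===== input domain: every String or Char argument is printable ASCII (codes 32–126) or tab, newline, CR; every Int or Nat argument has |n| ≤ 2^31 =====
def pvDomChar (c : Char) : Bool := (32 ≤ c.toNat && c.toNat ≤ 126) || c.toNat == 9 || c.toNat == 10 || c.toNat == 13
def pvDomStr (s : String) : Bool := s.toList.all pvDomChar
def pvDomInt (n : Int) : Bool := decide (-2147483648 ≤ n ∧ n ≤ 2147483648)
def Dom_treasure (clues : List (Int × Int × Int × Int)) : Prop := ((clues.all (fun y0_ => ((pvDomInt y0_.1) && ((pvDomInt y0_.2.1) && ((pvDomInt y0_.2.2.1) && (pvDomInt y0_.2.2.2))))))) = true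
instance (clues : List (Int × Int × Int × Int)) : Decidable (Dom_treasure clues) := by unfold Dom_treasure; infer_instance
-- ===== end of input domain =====

-- B replaces A's visited-set with constant-memory revisit detection by re-walking the chain
-- from the origin (an alternative decomposition, not faster).

-- ===== PORT A =====
-- A's while-loop; fuel = clues.length + 1 always suffices (the visited set grows by a
-- distinct dict key each iteration), so the fuel-0 branch is never reached on real runs.
def treasureLoop (d : PySem.Dict (Int × Int) (Int × Int)) :
    Nat → (Int × Int) → PySem.Set (Int × Int) → (Int × Int)
  | 0, cur, _ => cur
  | fuel + 1, cur, visited =>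
    match d.get? cur with
    | none => cur
    | some nxt =>
      let visited' := PySem.Set.add visited cur
      if PySem.Set.contains visited' nxt then nxt
      else treasureLoop d fuel nxt visited'

def treasure (clues : List (Int × Int × Int × Int)) : Int × Int :=
  let d := clues.foldl (fun d y => d.insert (y.1, y.2.1) (y.2.2.1, y.2.2.2)) PySem.Dict.empty
  treasureLoop d (clues.length + 1) (0, 0) PySem.Set.empty

-- ===== PORT B =====
-- x = clues.get(x, x); the default is never used on the walked path
def altStep (d : PySem.Dict (Int × Int) (Int × Int)) (x : Int × Int) : Int × Int :=
  (d.get? x).getD x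

-- the inner for-loop: does tgt occur among the first n nodes of the walk starting at x?
def altSeen (d : PySem.Dict (Int × Int) (Int × Int)) (tgt : Int × Int) :
    Nat → (Int × Int) → Bool
  | 0, _ => false
  | n + 1, x => if x == tgt then true else altSeen d tgt n (altStep d x)

-- B's while-loop, same fuel convention as A's port
def treasureAltLoop (d : PySem.Dict (Int × Int) (Int × Int)) :
    Nat → (Int × Int) → Nat → (Int × Int)
  | 0, cur, _ => cur
  | fuel + 1, cur, steps =>
    match d.get? cur with
    | none => cur
    | some nxt =>
      if altSeen d nxt (steps + 1) (0, 0) then nxt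
      else treasureAltLoop d fuel nxt (steps + 1)

def treasure_alt (clues : List (Int × Int × Int × Int)) : Int × Int :=
  let d := clues.foldl (fun d y => d.insert (y.1, y.2.1) (y.2.2.1, y.2.2.2)) PySem.Dict.empty
  treasureAltLoop d (clues.length + 1) (0, 0) 0

-- ===== PRECONDITION & SPEC =====
def Spec_treasure (clues : List (Int × Int × Int × Int)) (out : Int × Int) : Prop := out = treasure_alt clues
instance (clues : List (Int × Int × Int × Int)) (out : Int × Int) : Decidable (Spec_treasure clues out) := by unfold Spec_treasure; infer_instance

-- ===== CLAIM (what is proved, stated in full; the proofs are below) =====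
def Claim_equal_treasure : Prop := ∀ (clues : List (Int × Int × Int × Int)), Dom_treasure clues → Spec_treasure clues (treasure clues)

-- ===== LEMMAS AND PROOFS =====

-- the n-th node of the walk from x (recursion aligned with altSeen)
def iterW (d : PySem.Dict (Int × Int) (Int × Int)) : Nat → (Int × Int) → (Int × Int)
  | 0, x => x
  | n + 1, x => iterW d n (altStep d x)

theorem iterW_succ_right (d : PySem.Dict (Int × Int) (Int × Int)) (n : Nat) (x : Int × Int) :
    iterW d (n + 1) x = altStep d (iterW d n x) := by
  induction n generalizing x with
  | zero => rfl
  | succ n ih => simpa only [iterW] using ih (altStep d x)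

theorem altSeen_succ (d : PySem.Dict (Int × Int) (Int × Int)) (tgt : Int × Int)
    (n : Nat) (x : Int × Int) :
    altSeen d tgt (n + 1) x = (altSeen d tgt n x || (iterW d n x == tgt)) := by
  induction n generalizing x with
  | zero => cases h : x == tgt <;> simp [altSeen, iterW, h]
  | succ n ih =>
    by_cases h : x = tgt
    · simp [altSeen, h]
    · have hb : (x == tgt) = false := by simp [h]
      calc altSeen d tgt (n + 1 + 1) x
          = altSeen d tgt (n + 1) (altStep d x) := by simp [altSeen, hb]
        _ = (altSeen d tgt n (altStep d x) || (iterW d n (altStep d x) == tgt)) := ih _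
        _ = (altSeen d tgt (n + 1) x || (iterW d (n + 1) x == tgt)) := by
              simp [altSeen, hb, iterW]

theorem loop_eq (d : PySem.Dict (Int × Int) (Int × Int)) :
    ∀ (fuel : Nat) (cur : Int × Int) (V : PySem.Set (Int × Int)) (k : Nat),
      (∀ z, z ∈ V ↔ altSeen d z k (0, 0) = true) →
      cur = iterW d k (0, 0) →
      treasureLoop d fuel cur V = treasureAltLoop d fuel cur k := by
  intro fuel
  induction fuel with
  | zero => intro cur V k _ _; rfl
  | succ fuel ih =>
    intro cur V k hV hcur
    simp only [treasureLoop, treasureAltLoop]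
    cases hget : d.get? cur with
    | none => rfl
    | some nxt =>
      have hnxt : iterW d (k + 1) (0, 0) = nxt := by
        rw [iterW_succ_right, ← hcur]
        simp [altStep, hget]
      have hmem : ∀ z, z ∈ PySem.Set.add V cur ↔ altSeen d z (k + 1) (0, 0) = true := by
        intro z
        rw [PySem.Set.mem_add, altSeen_succ, hV z, ← hcur]
        constructor
        · rintro (h | h)
          · simp [h]
          · simp [h]
        · intro h
          rcases Bool.or_eq_true_iff.mp h with h | h
          · exact Or.inl h
          · exact Or.inr (beq_iff_eq.mp h).symm
      have htest : PySem.Set.contains (PySem.Set.add V cur) nxt = altSeen d nxt (k + 1) (0, 0) := by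
        rcases hb : altSeen d nxt (k + 1) (0, 0) with _ | _
        · simp only [PySem.Set.contains_eq_listContains]
          rw [← Bool.not_eq_true]
          intro hc
          have := (hmem nxt).mp (by simpa using hc)
          simp [this] at hb
        · simp only [PySem.Set.contains_eq_listContains]
          simpa using (hmem nxt).mpr hb
      simp only [htest]
      cases hb : altSeen d nxt (k + 1) (0, 0) with
      | true => rfl
      | false => exact ih nxt (PySem.Set.add V cur) (k + 1) hmem hnxt.symm

-- ===== VERDICT (by name: the statement is the Claim_ definition above) =====
theorem treasure_spec : Claim_equal_treasure := by
  intro clues _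
  unfold Spec_treasure treasure treasure_alt
  exact loop_eq _ _ _ _ _ (by intro z; simp [altSeen, PySem.Set.empty]) rfl
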